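-- pv_equiv track=rewrite | github.com/rahulrajaram/robottxtparser | robottxtparser.py | is_EOL
-- ===== SOURCE A (Python) =====
-- def is_WS(token):
--     return token in [' ', '\t']
--
-- def is_EOL(line):
--     tokens = [token.strip() for token in line.strip()]
--     i = 0
--     while i < len(tokens):
--         if tokens[i].startswith('#'):
--             return True
--         if not is_WS(tokens[i]):
--             return False
--         i += 1
--     return True
-- ===== SOURCE B (Python) =====
-- def is_EOL(line):
--     stripped = line.strip()
--     return (not stripped) or stripped.startswith('#')
-- ===== Notes on version B (the rewrite author's own statement) =====
-- stated objective: simpler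
-- what changed: Replaces A's per-character tokenize-strip-and-scan while-loop (and its is_WS helper) with one direct boolean test on the stripped line: empty, or comment-prefixed.
import Mathlib
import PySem

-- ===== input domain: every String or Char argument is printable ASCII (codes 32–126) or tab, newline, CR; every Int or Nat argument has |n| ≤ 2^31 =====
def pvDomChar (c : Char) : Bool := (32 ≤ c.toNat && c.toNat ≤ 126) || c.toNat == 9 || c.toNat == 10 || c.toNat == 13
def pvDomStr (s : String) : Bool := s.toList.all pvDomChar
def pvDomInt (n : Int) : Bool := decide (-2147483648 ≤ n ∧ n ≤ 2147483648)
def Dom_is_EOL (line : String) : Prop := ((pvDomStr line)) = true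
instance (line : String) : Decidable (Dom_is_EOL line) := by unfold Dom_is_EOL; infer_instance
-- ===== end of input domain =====

-- B replaces A's per-character tokenize/strip/scan loop with one boolean expression; objective: simpler.

-- ===== PORT A =====
def is_WS (token : String) : Bool := token == " " || token == "\t"

-- the while-i loop of A, as structural recursion over the token list
def isEOLLoop : List String → Bool
  | [] => true
  | t :: rest =>
    if PySem.Str.startswith t "#" then true
    else if !is_WS t then false
    else isEOLLoop rest

def is_EOL (line : String) : Bool :=
  let tokens := (PySem.Str.strip line).toList.map (fun c => PySem.Str.strip (String.ofList [c]))
  isEOLLoop tokens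

-- ===== PORT B =====
def is_EOL_alt (line : String) : Bool :=
  let stripped := PySem.Str.strip line
  stripped == "" || PySem.Str.startswith stripped "#"

-- ===== PRECONDITION & SPEC =====
def Spec_is_EOL (line : String) (out : Bool) : Prop := out = is_EOL_alt line
instance (line : String) (out : Bool) : Decidable (Spec_is_EOL line out) := by unfold Spec_is_EOL; infer_instance

-- ===== CLAIM (what is proved, stated in full; the proofs are below) =====
def Claim_equal_is_EOL : Prop := ∀ (line : String), Dom_is_EOL line → Spec_is_EOL line (is_EOL line)

-- ===== LEMMAS AND PROOFS =====

theorem toList_mk_single (c : Char) : (String.ofList [c]).toList = [c] := by simp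

-- the head of a stripped char list is never whitespace
theorem head_strip_not_space (l : List Char) (c : Char) (rest : List Char)
    (h : PySem.Chars.strip l = c :: rest) : PySem.Chars.isspace c = false := by
  unfold PySem.Chars.strip PySem.Chars.rstrip PySem.Chars.lstrip at h
  have hpre : (List.dropWhile PySem.Chars.isspace
      (List.dropWhile PySem.Chars.isspace l).reverse).reverse <+:
      List.dropWhile PySem.Chars.isspace l := by
    simpa using List.reverse_prefix.mpr
      (List.dropWhile_suffix (l := (List.dropWhile PySem.Chars.isspace l).reverse)
        (p := PySem.Chars.isspace))
  rw [h] at hpre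
  obtain ⟨t, ht⟩ := hpre
  have h9 : List.dropWhile PySem.Chars.isspace l = c :: (rest ++ t) := by
    simpa using ht.symm
  have hx := List.head_dropWhile_not (p := PySem.Chars.isspace) (l := l) (by simp [h9])
  simp [h9] at hx
  simpa using hx

theorem strip_single_of_not_space (c : Char) (h : PySem.Chars.isspace c = false) :
    PySem.Chars.strip [c] = [c] := by
  unfold PySem.Chars.strip PySem.Chars.rstrip PySem.Chars.lstrip
  simp [List.dropWhile, h]

-- ===== VERDICT (by name: the statement is the Claim_ definition above) =====
theorem is_EOL_spec : Claim_equal_is_EOL := by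
  intro line _
  unfold Spec_is_EOL is_EOL is_EOL_alt
  cases hs : (PySem.Str.strip line).toList with
  | nil =>
    have : PySem.Str.strip line = "" := by
      apply String.ext; simpa using hs
    simp [this, isEOLLoop]
  | cons c rest =>
    have hcs : PySem.Chars.isspace c = false := by
      apply head_strip_not_space line.toList c rest
      rw [← PySem.Str.toList_strip]; exact hs
    have hne : (PySem.Str.strip line == "") = false := by
      simp [String.ext_iff, hs]
    have htok : PySem.Str.strip (String.ofList [c]) = String.ofList [c] := by
      apply String.ext
      have := PySem.Str.toList_strip (String.ofList [c])
      rw [toList_mk_single] at this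
      rw [this, strip_single_of_not_space c hcs, toList_mk_single]
    have hsw : PySem.Str.startswith (PySem.Str.strip line) "#" = ('#' == c) := by
      simp [PySem.Str.startswith_eq, PySem.Chars.startswith, hs, List.isPrefixOf]
    simp only [hs, List.map_cons, isEOLLoop, htok, hne, hsw, Bool.false_or]
    by_cases hc : c = '#'
    · simp [hc, PySem.Str.startswith_eq, PySem.Chars.startswith, List.isPrefixOf, toList_mk_single]
    · have hnotsp : c ≠ ' ' := by rintro rfl; simp [PySem.Chars.isspace] at hcs
      have hnottab : c ≠ '\t' := by rintro rfl; simp [PySem.Chars.isspace] at hcs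
      have hws : is_WS (String.ofList [c]) = false := by
        simp [is_WS, String.ext_iff, toList_mk_single, hnotsp, hnottab]
      have hsw1 : PySem.Str.startswith (String.ofList [c]) "#" = false := by
        simp [PySem.Str.startswith_eq, PySem.Chars.startswith, List.isPrefixOf, toList_mk_single, Ne.symm hc]
      simp [hsw1, hws, toList_mk_single, PySem.Chars.startswith, List.isPrefixOf, Ne.symm hc]
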